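-- pv_equiv track=rewrite | github.com/karnikatharva1009-tech/python-with-dsa1 | problem_ statement.py | security_key
-- ===== SOURCE A (Python) =====
-- def security_key(number):
--     visible=set()
--     repeatednumber=0
--     for ch in str(number):
--         if ch in visible:
--             repeatednumber+=1
--         else:
--            visible.add(ch)
--     return repeatednumber if repeatednumber>0 else -1
-- ===== SOURCE B (Python) =====
-- def security_key(number):
--     t = sorted(str(number))
--     r = sum(1 for a, b in zip(t, t[1:]) if a == b)
--     return r if r > 0 else -1
-- ===== Notes on version B (the rewrite author's own statement) =====
-- stated objective: alternative
-- what changed: Replaces the seen-set loop with a sort-then-scan: sort the characters of str(number) and count adjacent equal pairs (equal characters are adjacent after sorting), keeping the zero-to-minus-one sentinel; no set is used.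
import Mathlib
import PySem

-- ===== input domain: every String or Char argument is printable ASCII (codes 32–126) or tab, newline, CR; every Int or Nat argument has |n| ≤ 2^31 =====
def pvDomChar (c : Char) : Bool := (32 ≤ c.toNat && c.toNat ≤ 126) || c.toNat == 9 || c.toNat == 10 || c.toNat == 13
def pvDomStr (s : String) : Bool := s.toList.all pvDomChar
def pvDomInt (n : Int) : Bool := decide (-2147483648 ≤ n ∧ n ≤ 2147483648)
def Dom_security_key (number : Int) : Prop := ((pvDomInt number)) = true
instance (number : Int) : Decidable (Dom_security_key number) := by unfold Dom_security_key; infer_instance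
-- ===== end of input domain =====

-- B sorts the characters of str(number) and counts adjacent equal pairs instead of running a seen-set loop.

-- ===== PORT A =====
def security_key (number : Int) : Int :=
  let st := (PySem.Int.toChars number).foldl
    (fun (st : PySem.Set Char × Int) ch =>
      if PySem.Set.contains st.1 ch then (st.1, st.2 + 1)
      else (PySem.Set.add st.1 ch, st.2))
    (PySem.Set.empty, 0)
  if st.2 > 0 then st.2 else -1

-- ===== PORT B =====
def security_key_alt (number : Int) : Int :=
  let t := PySem.List.sorted (PySem.Int.toChars number) (fun c => c) false
  let r : Int := (t.zip t.tail).foldl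
    (fun (acc : Int) p => if p.1 = p.2 then acc + 1 else acc) 0
  if r > 0 then r else -1

-- ===== PRECONDITION & SPEC =====
def Spec_security_key (number : Int) (out : Int) : Prop := out = security_key_alt number
instance (number : Int) (out : Int) : Decidable (Spec_security_key number out) := by unfold Spec_security_key; infer_instance

-- ===== CLAIM (what is proved, stated in full; the proofs are below) =====
def Claim_equal_security_key : Prop := ∀ (number : Int), Dom_security_key number → Spec_security_key number (security_key number)

-- ===== LEMMAS AND PROOFS =====

-- number of adjacent equal pairs in a list
def adjC : List Char → Int
  | [] => 0
  | [_] => 0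
  | a :: b :: t => (if a = b then 1 else 0) + adjC (b :: t)

theorem adjC_cons2 (a b : Char) (t : List Char) :
    adjC (a :: b :: t) = (if a = b then 1 else 0) + adjC (b :: t) := rfl

theorem zip_foldl_adjC (l : List Char) : ∀ (k : Int),
    (l.zip l.tail).foldl (fun (acc : Int) p => if p.1 = p.2 then acc + 1 else acc) k
    = k + adjC l := by
  induction l with
  | nil => intro k; simp [adjC]
  | cons a rest ih =>
    intro k
    cases rest with
    | nil => simp [adjC]
    | cons b t =>
      simp only [List.tail_cons, List.zip_cons_cons, List.foldl_cons]
      rw [show ((b :: t).zip t) = ((b :: t).zip (b :: t).tail) from rfl, ih, adjC_cons2]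
      split_ifs <;> ring

-- in a ≤-chain, the number of adjacent equal pairs is length minus number of distinct elements
theorem chain_card_adjC : ∀ (l : List Char), l.Pairwise (· ≤ ·) →
    (l.toFinset.card : Int) + adjC l = l.length := by
  intro l
  induction l with
  | nil => intro _; simp [adjC]
  | cons a rest ih =>
    intro hp
    rw [List.pairwise_cons] at hp
    obtain ⟨ha, hrest⟩ := hp
    cases rest with
    | nil => simp [adjC]
    | cons b t =>
      have hmem : a ∈ b :: t ↔ a = b := by
        constructor
        · intro h
          rcases List.mem_cons.mp h with h | h
          · exact h
          · have hb : b ≤ a := (List.pairwise_cons.mp hrest).1 a h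
            have hab : a ≤ b := ha b (List.mem_cons_self)
            exact le_antisymm hab hb
        · intro h; simp [h]
      have hih := ih hrest
      rw [adjC_cons2]
      by_cases hab : a = b
      · have hm : a ∈ (b :: t).toFinset := by simp [hab]
        rw [List.toFinset_cons, Finset.insert_eq_self.mpr hm, if_pos hab]
        simp only [List.length_cons] at hih ⊢
        push_cast at hih ⊢
        omega
      · have hm : a ∉ (b :: t).toFinset := by
          simp only [List.mem_toFinset]; rw [hmem]; exact hab
        rw [List.toFinset_cons, Finset.card_insert_of_notMem hm, if_neg hab]
        simp only [List.length_cons] at hih ⊢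
        push_cast at hih ⊢
        omega

-- A's fold counter = length minus size of the accumulated set
theorem sk_fold_count (l : List Char) : ∀ (s : PySem.Set Char) (k : Int),
    (l.foldl
      (fun (st : PySem.Set Char × Int) ch =>
        if PySem.Set.contains st.1 ch then (st.1, st.2 + 1)
        else (PySem.Set.add st.1 ch, st.2))
      (s, k)).2
    = k + (l.length : Int) - ((PySem.Set.update s l).length : Int) + (s.length : Int) := by
  induction l with
  | nil => intro s k; simp [PySem.Set.update]
  | cons c l ih =>
    intro s k
    by_cases h : PySem.Set.contains s c
    · simp only [List.foldl_cons, h, if_pos]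
      rw [ih]
      have : PySem.Set.add s c = s := by simp [PySem.Set.add]; simpa using h
      simp [PySem.Set.update, this]
      ring
    · simp only [List.foldl_cons, h]
      rw [ih]
      have hadd : PySem.Set.add s c = s ++ [c] := by
        simp [PySem.Set.add]
        simpa using h
      simp [PySem.Set.update, hadd]
      ring

-- the deduplicated list has as many elements as the Finset of the original list
theorem ofList_length_eq_card (l : List Char) :
    (PySem.Set.ofList l).length = l.toFinset.card := by
  have hnd : (PySem.Set.ofList l).Nodup := PySem.Set.nodup_ofList l
  have hfs : (PySem.Set.ofList l).toFinset = l.toFinset := by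
    apply Finset.ext; intro x
    simp [List.mem_toFinset, PySem.Set.mem_ofList]
  rw [← hfs, List.toFinset_card_of_nodup hnd]

-- ===== VERDICT (by name: the statement is the Claim_ definition above) =====
theorem security_key_spec : Claim_equal_security_key := by
  intro number _
  unfold Spec_security_key security_key security_key_alt
  dsimp only
  rw [sk_fold_count, zip_foldl_adjC]
  set s := PySem.Int.toChars number with hs
  set t := PySem.List.sorted s (fun c => c) false with ht
  have hperm : t.Perm s := PySem.List.sorted_perm s (fun c => c) false
  have hpw : t.Pairwise (· ≤ ·) := by
    have := PySem.List.sorted_pairwise (xs := s) (key := fun c => c)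
    simpa using this
  have hchain := chain_card_adjC t hpw
  have hlen : t.length = s.length := hperm.length_eq
  have hfs : t.toFinset = s.toFinset := by
    apply Finset.ext; intro x
    simp only [List.mem_toFinset]
    exact hperm.mem_iff
  have hof : PySem.Set.update PySem.Set.empty s = PySem.Set.ofList s := by
    simp [PySem.Set.ofList_eq_foldl, PySem.Set.update, PySem.Set.empty]
  rw [hof, ofList_length_eq_card]
  rw [hlen, hfs] at hchain
  have : (0 : Int) + (s.length : Int) - (s.toFinset.card : Int) + ((PySem.Set.empty : PySem.Set Char).length : Int)
      = 0 + adjC t := by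
    simp [PySem.Set.empty]
    omega
  rw [this]
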